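-- pv_equiv track=rewrite | github.com/CPlusPlusTheBest/numerical_methods_2026 | numerical_methods_2026/lab2/main.py | forward_differences
-- ===== SOURCE A (Python) =====
-- def forward_differences(y):
--     n = len(y)
--     # Create a list to store the first entries of each difference level
--     diffs = [y[0]]
--     current_layer = y
--     for i in range(1, n):
--         # Calculate the next layer of differences
--         next_layer = []
--         for j in range(len(current_layer) - 1):
--             next_layer.append(current_layer[j + 1] - current_layer[j])
--         diffs.append(next_layer[0])
--         current_layer = next_layer
--     return diffs
-- ===== SOURCE B (Python) =====
-- def forward_differences(y):
--     n = len(y)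
--     a = list(y)
--     diffs = [a[0]]
--     for i in range(1, n):
--         for j in range(n - 1, i - 1, -1):
--             a[j] = a[j] - a[j - 1]
--         diffs.append(a[i])
--     return diffs
-- ===== Notes on version B (the rewrite author's own statement) =====
-- stated objective: alternative
-- what changed: B keeps a single in-place working array updated by a backward inner sweep (each cell minus its left neighbour) instead of allocating a fresh difference layer per pass, reading each pass's leading entry out of the array.
-- outside the precondition, e.g. on forward_differences([]): A raises IndexError, B raises IndexError
import Mathlib
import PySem

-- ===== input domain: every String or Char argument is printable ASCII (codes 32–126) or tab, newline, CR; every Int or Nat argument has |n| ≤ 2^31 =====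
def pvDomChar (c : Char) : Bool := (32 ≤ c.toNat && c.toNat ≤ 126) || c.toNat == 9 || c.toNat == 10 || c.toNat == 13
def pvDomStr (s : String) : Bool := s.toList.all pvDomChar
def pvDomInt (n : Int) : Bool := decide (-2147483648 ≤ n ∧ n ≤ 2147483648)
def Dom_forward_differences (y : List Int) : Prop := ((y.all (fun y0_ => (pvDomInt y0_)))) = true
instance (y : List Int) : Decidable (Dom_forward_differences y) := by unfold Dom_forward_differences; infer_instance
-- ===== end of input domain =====

-- B maintains one in-place array with a backward inner sweep instead of allocating a new
-- difference layer per pass (objective: alternative; same O(n^2) time).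

-- ===== PORT A =====
-- inner loop of A: next_layer.append(current_layer[j+1] - current_layer[j]) for j = 0 .. len-2
def fdA_next : List Int → List Int
  | a :: b :: rest => (b - a) :: fdA_next (b :: rest)
  | _ => []

-- outer loop of A: k remaining iterations of `for i in range(1, n)`
def fdA_loop : Nat → List Int → List Int → List Int
  | 0, _, diffs => diffs
  | k + 1, cur, diffs =>
      let next := fdA_next cur
      fdA_loop k next (diffs ++ [next.headD 0])

def forward_differences (y : List Int) : List Int :=
  fdA_loop (y.length - 1) y [y.headD 0]   -- the first-element access raises on empty y; excluded by Pre_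

-- ===== PORT B =====
-- inner loop of B: c steps of subtracting the left neighbour into position j, j descending
def fdB_inner : List Int → Nat → Nat → List Int
  | a, _, 0 => a
  | a, j, c + 1 => fdB_inner (a.set j (a.getD j 0 - a.getD (j - 1) 0)) (j - 1) c

-- outer loop of B: `for i in range(1, n)` with in-place array a
def fdB_loop (a : List Int) (i n : Nat) (diffs : List Int) : List Int :=
  if _h : i < n then
    let a' := fdB_inner a (n - 1) (n - i)
    fdB_loop a' (i + 1) n (diffs ++ [a'.getD i 0])
  else diffs
termination_by n - i

def forward_differences_alt (y : List Int) : List Int :=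
  fdB_loop y 1 y.length [y.headD 0]   -- a = list(y); the first-element access raises on empty y; excluded by Pre_

-- ===== PRECONDITION & SPEC =====
-- Pre_ excludes only y = [], where both Pythons raise IndexError on the initial first-element access.
def Pre_forward_differences (y : List Int) : Prop := y ≠ []
instance (y : List Int) : Decidable (Pre_forward_differences y) := by unfold Pre_forward_differences; infer_instance
def pvWitness_forward_differences : List Int := ([1, 4, 9, 16])

def Spec_forward_differences (y : List Int) (out : List Int) : Prop := out = forward_differences_alt y
instance (y : List Int) (out : List Int) : Decidable (Spec_forward_differences y out) := by unfold Spec_forward_differences; infer_instance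

-- ===== CLAIM (what is proved, stated in full; the proofs are below) =====
def Claim_equal_forward_differences : Prop := ∀ (y : List Int), Dom_forward_differences y → Pre_forward_differences y → Spec_forward_differences y (forward_differences y)

-- ===== LEMMAS AND PROOFS =====

theorem fdA_next_append (l : List Int) (u : Int) (h : l ≠ []) :
    fdA_next (l ++ [u]) = fdA_next l ++ [u - l.getD (l.length - 1) 0] := by
  induction l with
  | nil => exact absurd rfl h
  | cons x t ih =>
      cases t with
      | nil => simp [fdA_next]
      | cons y s => simpa [fdA_next] using ih (by simp)
theorem fdB_inner_append (c : Nat) : ∀ (b : List Int) (v : Int) (j : Nat), j < b.length →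
    fdB_inner (b ++ [v]) j c = fdB_inner b j c ++ [v] := by
  induction c with
  | zero => intro b v j _; rfl
  | succ c ih =>
      intro b v j hj
      have hset : (b ++ [v]).set j (b.getD j 0 - b.getD (j - 1) 0)
          = b.set j (b.getD j 0 - b.getD (j - 1) 0) ++ [v] := by
        rw [List.set_append_left _ _ hj]
      have hg1 : (b ++ [v]).getD j 0 = b.getD j 0 := by
        simp [List.getD, List.getElem?_append_left hj]
      have hg2 : (b ++ [v]).getD (j - 1) 0 = b.getD (j - 1) 0 := by
        have : j - 1 < b.length := lt_of_le_of_lt (Nat.sub_le _ _) hj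
        simp [List.getD, List.getElem?_append_left this]
      have hj' : j - 1 < (b.set j (b.getD j 0 - b.getD (j - 1) 0)).length := by
        simp; exact lt_of_le_of_lt (Nat.sub_le _ _) hj
      simp only [fdB_inner, hset, hg1, hg2, ih _ v _ hj']
theorem fdB_inner_succ (a : List Int) (j c : Nat) :
    fdB_inner a j (c + 1) = fdB_inner (a.set j (a.getD j 0 - a.getD (j - 1) 0)) (j - 1) c := rfl

theorem getD_app_left (b q : List Int) (i : Nat) (h : i < b.length) :
    (b ++ q).getD i 0 = b.getD i 0 := by
  simp [List.getD, List.getElem?_append_left h]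

theorem getD_app_right (b q : List Int) (i : Nat) :
    (b ++ q).getD (b.length + i) 0 = q.getD i 0 := by
  simp only [List.getD]
  rw [List.getElem?_append_right (Nat.le_add_right _ _)]
  simp

theorem getD_app_last (b : List Int) (v : Int) :
    (b ++ [v]).getD b.length 0 = v := by
  rw [show b.length = b.length + 0 from rfl, getD_app_right]
  rfl

theorem set_app_last (b : List Int) (u v : Int) : (b ++ [u]).set b.length v = b ++ [v] := by
  rw [show b.length = b.length + 0 from rfl, List.set_append_right _ _ (Nat.le_add_right _ _)]
  simp

theorem fdB_inner_pass (p : List Int) (x : Int) (a : List Int) :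
    fdB_inner (p ++ x :: a) (p.length + a.length) a.length = p ++ x :: fdA_next (x :: a) := by
  induction a using List.reverseRecOn with
  | nil => simp [fdB_inner, fdA_next]
  | append_singleton as u ih =>
      have e1 : p ++ x :: (as ++ [u]) = (p ++ x :: as) ++ [u] := by simp
      have e2 : p.length + (as ++ [u]).length = (p ++ x :: as).length := by simp
      have e3 : (as ++ [u]).length = as.length + 1 := by simp
      rw [e1, e2, e3, fdB_inner_succ, getD_app_last,
          getD_app_left _ _ _ (by simp : (p ++ x :: as).length - 1 < (p ++ x :: as).length),
          set_app_last]
      have hlast : (p ++ x :: as).getD ((p ++ x :: as).length - 1) 0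
          = (x :: as).getD ((x :: as).length - 1) 0 := by
        have h1 : (p ++ x :: as).length - 1 = p.length + ((x :: as).length - 1) := by
          simp
        rw [h1, getD_app_right]
      have hj : (p ++ x :: as).length - 1 = p.length + as.length := by simp
      rw [hlast, hj, fdB_inner_append as.length _ _ _ (by simp : p.length + as.length < (p ++ x :: as).length), ih,
          show x :: (as ++ [u]) = (x :: as) ++ [u] by simp,
          fdA_next_append (x :: as) u (by simp)]
      simp

theorem fdA_next_length : ∀ (l : List Int), (fdA_next l).length = l.length - 1
  | [] => rfl
  | [_] => rfl
  | _ :: b :: rest => by simp [fdA_next, fdA_next_length (b :: rest)]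

theorem loops_agree : ∀ (k : Nat) (p cur diffs : List Int), cur.length = k + 1 →
    fdB_loop (p ++ cur) (p.length + 1) (p.length + k + 1) diffs = fdA_loop k cur diffs := by
  intro k
  induction k with
  | zero =>
      intro p cur diffs _
      rw [fdB_loop, fdA_loop]
      simp
  | succ k ih =>
      intro p cur diffs hlen
      obtain ⟨x, t, rfl⟩ : ∃ x t, cur = x :: t := by
        cases cur with
        | nil => simp at hlen
        | cons x t => exact ⟨x, t, rfl⟩
      have ht : t.length = k + 1 := by simpa using hlen
      have hlt : p.length + 1 < p.length + (k + 1) + 1 := by omega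
      rw [fdB_loop]
      simp only [dif_pos hlt]
      have h1 : p.length + (k + 1) + 1 - 1 = p.length + t.length := by omega
      have h2 : p.length + (k + 1) + 1 - (p.length + 1) = t.length := by omega
      rw [h1, h2, fdB_inner_pass p x t]
      have hnext : (fdA_next (x :: t)).length = k + 1 := by
        rw [fdA_next_length]; simpa using hlen
      have hre : p ++ x :: fdA_next (x :: t) = (p ++ [x]) ++ fdA_next (x :: t) := by simp
      have hgd : (p ++ x :: fdA_next (x :: t)).getD (p.length + 1) 0
          = (fdA_next (x :: t)).headD 0 := by
        rw [hre, show p.length + 1 = (p ++ [x]).length + 0 by simp, getD_app_right]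
        cases fdA_next (x :: t) with
        | nil => rfl
        | cons z zs => rfl
      rw [hgd, hre, show p.length + 1 + 1 = (p ++ [x]).length + 1 by simp,
          show p.length + (k + 1) + 1 = (p ++ [x]).length + k + 1 by simp; omega,
          ih (p ++ [x]) (fdA_next (x :: t)) _ hnext]
      rw [fdA_loop]

-- ===== VERDICT (by name: the statement is the Claim_ definition above) =====
theorem forward_differences_spec : Claim_equal_forward_differences := by
  intro y _ hpre
  unfold Spec_forward_differences forward_differences forward_differences_alt
  cases y with
  | nil => exact absurd rfl hpre
  | cons x t =>
      have := loops_agree t.length [] (x :: t) [(x :: t).headD 0] (by simp)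
      simpa using this.symm
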